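-- pv_equiv track=rewrite | github.com/synacktiv/GPOddity | helpers/ldap_utils.py | update_extensionNames
-- ===== SOURCE A (Python) =====
-- def update_extensionNames(extensionName):
--     val1 = "00000000-0000-0000-0000-000000000000"
--     val2 = "CAB54552-DEEA-4691-817E-ED4A4D1AFC72"
--     val3 = "AADCED64-746C-4633-A97C-D61349046527"
--
--     if extensionName is None:
--         extensionName = ""
--
--     try:
--         if not val2 in extensionName:
--             new_values = []
--             toUpdate = ''.join(extensionName)
--             test = toUpdate.split("[")
--             for i in test:
--                 new_values.append(i.replace("{", "").replace("}", " ").replace("]", ""))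
--
--             if val1 not in toUpdate:
--                 new_values.append(val1 + " " + val2)
--
--             elif val1 in toUpdate:
--                 for k, v in enumerate(new_values):
--                     if val1 in new_values[k]:
--                         toSort = []
--                         test2 = new_values[k].split()
--                         for f in range(1, len(test2)):
--                             toSort.append(test2[f])
--                         toSort.append(val2)
--                         toSort.sort()
--                         new_values[k] = test2[0]
--                         for val in toSort:
--                             new_values[k] += " " + val
--
--             if val3 not in toUpdate:
--                 new_values.append(val3 + " " + val2)
--
--             elif val3 in toUpdate:
--                 for k, v in enumerate(new_values):
--                     if val3 in new_values[k]:
--                         toSort = []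
--                         test2 = new_values[k].split()
--                         for f in range(1, len(test2)):
--                             toSort.append(test2[f])
--                         toSort.append(val2)
--                         toSort.sort()
--                         new_values[k] = test2[0]
--                         for val in toSort:
--                             new_values[k] += " " + val
--
--             new_values.sort()
--
--             new_values2 = []
--             for i in range(len(new_values)):
--                 if new_values[i] is None or new_values[i] == "":
--                     continue
--                 value1 = new_values[i].split()
--                 new_val = ""
--                 for q in range(len(value1)):
--                     if value1[q] is None or value1[q] == "":
--                         continue
--                     new_val += "{" + value1[q] + "}"
--                 new_val = "[" + new_val + "]"
--                 new_values2.append(new_val)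
--
--             return "".join(new_values2)
--         else:
--             return extensionName
--     except:
--         return "[{" + val1 + "}{" + val2 + "}]" + "[{" + val3 + "}{" + val2 + "}]"
-- ===== SOURCE B (Python) =====
-- VAL1 = "00000000-0000-0000-0000-000000000000"
-- VAL2 = "CAB54552-DEEA-4691-817E-ED4A4D1AFC72"
-- VAL3 = "AADCED64-746C-4633-A97C-D61349046527"
--
--
-- def update_extensionNames(extensionName):
--     s = extensionName if extensionName is not None else ""
--     if VAL2 in s:
--         return s
--
--     # one character-level scan: '[' starts a new entry, '{'/']' are dropped,
--     # '}' becomes a space; replaces A's split('[') + chained str.replace passes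
--     entries, cur = [], []
--     for ch in s:
--         if ch == '[':
--             entries.append(''.join(cur))
--             cur = []
--         elif ch == '{' or ch == ']':
--             pass
--         elif ch == '}':
--             cur.append(' ')
--         else:
--             cur.append(ch)
--     entries.append(''.join(cur))
--
--     # one pass over the entries: count how many of the present guids an entry
--     # holds and insert that many copies of VAL2 among its tail tokens, sorted
--     p1, p3 = VAL1 in s, VAL3 in s
--     merged = []
--     for e in entries:
--         k = (p1 and VAL1 in e) + (p3 and VAL3 in e)
--         if k:
--             toks = e.split()
--             merged.append(' '.join(toks[:1] + sorted(toks[1:] + [VAL2] * k)))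
--         else:
--             merged.append(e)
--     if not p1:
--         merged.append(VAL1 + " " + VAL2)
--     if not p3:
--         merged.append(VAL3 + " " + VAL2)
--     merged.sort()
--
--     # serialize by a second character scan wrapping maximal nonspace runs
--     out = []
--     for e in merged:
--         if e == "":
--             continue
--         piece, in_tok = "[", False
--         for ch in e:
--             if ch.isspace():
--                 if in_tok:
--                     piece += "}"
--                 in_tok = False
--             else:
--                 if not in_tok:
--                     piece += "{"
--                 piece += ch
--                 in_tok = True
--         if in_tok:
--             piece += "}"
--         out.append(piece + "]")
--     return "".join(out)
-- ===== Notes on version B (the rewrite author's own statement) =====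
-- stated objective: alternative
-- what changed: A's bracket-split plus three chained str.replace passes, its two in-place enumerate merge loops and its index-based serialization loops are replaced by a character-level state machine that builds the normalized entries in one scan, a single pass over the entries that counts how many of the present guids each entry holds and inserts that many copies of the new guid at once (instead of re-splitting and re-sorting the entry in a second pass), and a second character-level state machine that serializes by wrapping maximal non-space runs in braces.
import Mathlib
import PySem

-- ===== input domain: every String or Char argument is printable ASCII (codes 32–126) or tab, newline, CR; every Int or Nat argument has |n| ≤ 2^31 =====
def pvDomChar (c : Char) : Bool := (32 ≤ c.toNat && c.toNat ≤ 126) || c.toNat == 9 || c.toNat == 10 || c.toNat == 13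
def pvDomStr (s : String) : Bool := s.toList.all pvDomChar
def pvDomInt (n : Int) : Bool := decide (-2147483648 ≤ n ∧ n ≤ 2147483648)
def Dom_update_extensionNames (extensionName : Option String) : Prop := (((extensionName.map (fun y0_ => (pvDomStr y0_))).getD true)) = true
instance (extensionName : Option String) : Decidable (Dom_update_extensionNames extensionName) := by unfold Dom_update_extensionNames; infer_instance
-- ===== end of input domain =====

-- B replaces A's split('[')/replace-chain parsing, its two in-place enumerate merge passes and its
-- index-loop serialization by two character-level state machines (parse and serialize) and ONE pass
-- over the entries that inserts all needed VAL2 copies at once (objective: alternative; same cost).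

-- ===== PORT A =====
-- Notes on the transliteration: ''.join(extensionName) on a str is the identity and is ported as such;
-- 'new_values[i] is None' is always false for a list of strings and is dropped; test2[0] is only
-- evaluated when the entry contains val1/val3 (then test2 ≠ []) and is ported with pyGetD;
-- the bare 'except' is unreachable (no operation raises on a str/None argument) and is not ported.
def update_extensionNames (extensionName : Option String) : String :=
  let val1 := "00000000-0000-0000-0000-000000000000"
  let val2 := "CAB54552-DEEA-4691-817E-ED4A4D1AFC72"
  let val3 := "AADCED64-746C-4633-A97C-D61349046527"
  let en := match extensionName with | none => "" | some s => s
  if !(PySem.Str.isIn val2 en) then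
    let toUpdate := en
    let test := (PySem.Str.split? toUpdate "[").getD []
    let new_values := List.foldl (fun acc i =>
        acc ++ [PySem.Str.replace (PySem.Str.replace (PySem.Str.replace i "{" "") "}" " ") "]" ""]) [] test
    let new_values :=
      if !(PySem.Str.isIn val1 toUpdate) then new_values ++ [val1 ++ " " ++ val2]
      else
        List.foldl (fun acc kv =>
          if PySem.Str.isIn val1 (PySem.List.pyGetD acc kv.1 "") then
            let test2 := PySem.Str.split₀ (PySem.List.pyGetD acc kv.1 "")
            let toSort := List.foldl (fun ts f => ts ++ [PySem.List.pyGetD test2 f ""]) []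
                (PySem.List.pyRange 1 (PySem.List.len test2))
            let toSort := PySem.List.sorted (toSort ++ [val2]) (fun x => x) false
            acc.set kv.1.toNat (List.foldl (fun s v => s ++ " " ++ v) (PySem.List.pyGetD test2 0 "") toSort)
          else acc) new_values (PySem.List.enumerate new_values)
    let new_values :=
      if !(PySem.Str.isIn val3 toUpdate) then new_values ++ [val3 ++ " " ++ val2]
      else
        List.foldl (fun acc kv =>
          if PySem.Str.isIn val3 (PySem.List.pyGetD acc kv.1 "") then
            let test2 := PySem.Str.split₀ (PySem.List.pyGetD acc kv.1 "")
            let toSort := List.foldl (fun ts f => ts ++ [PySem.List.pyGetD test2 f ""]) []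
                (PySem.List.pyRange 1 (PySem.List.len test2))
            let toSort := PySem.List.sorted (toSort ++ [val2]) (fun x => x) false
            acc.set kv.1.toNat (List.foldl (fun s v => s ++ " " ++ v) (PySem.List.pyGetD test2 0 "") toSort)
          else acc) new_values (PySem.List.enumerate new_values)
    let new_values := PySem.List.sorted new_values (fun x => x) false
    let new_values2 := List.foldl (fun acc i =>
        if PySem.List.pyGetD new_values i "" = "" then acc
        else
          let value1 := PySem.Str.split₀ (PySem.List.pyGetD new_values i "")
          let new_val := List.foldl (fun nv q =>
              if PySem.List.pyGetD value1 q "" = "" then nv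
              else nv ++ "{" ++ PySem.List.pyGetD value1 q "" ++ "}") ""
            (PySem.List.pyRange 0 (PySem.List.len value1))
          acc ++ ["[" ++ new_val ++ "]"]) [] (PySem.List.pyRange 0 (PySem.List.len new_values))
    PySem.Str.join "" new_values2
  else en

-- ===== PORT B =====
-- the per-character step of Source B's parsing state machine (entries so far, current entry)
def pvScanStep (st : List String × List Char) (ch : Char) : List String × List Char :=
  if ch = '[' then (st.1 ++ [String.ofList st.2], [])
  else if ch = '{' ∨ ch = ']' then st
  else if ch = '}' then (st.1, st.2 ++ [' '])
  else (st.1, st.2 ++ [ch])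

-- the per-character step of Source B's serializing state machine (piece so far, in_tok flag)
def pvSerStep (st : String × Bool) (ch : Char) : String × Bool :=
  if PySem.Chars.isspace ch then (if st.2 then (st.1 ++ "}", false) else (st.1, false))
  else ((if st.2 then st.1 else st.1 ++ "{") ++ String.ofList [ch], true)

def update_extensionNames_alt (extensionName : Option String) : String :=
  let val1 := "00000000-0000-0000-0000-000000000000"
  let val2 := "CAB54552-DEEA-4691-817E-ED4A4D1AFC72"
  let val3 := "AADCED64-746C-4633-A97C-D61349046527"
  let s := match extensionName with | none => "" | some t => t
  if PySem.Str.isIn val2 s then s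
  else
    let st := List.foldl pvScanStep ([], []) s.toList
    let entries := st.1 ++ [String.ofList st.2]
    let p1 := PySem.Str.isIn val1 s
    let p3 := PySem.Str.isIn val3 s
    let merged := entries.foldl (fun acc e =>
      let k := (if p1 && PySem.Str.isIn val1 e then 1 else 0)
             + (if p3 && PySem.Str.isIn val3 e then 1 else 0)
      if k ≠ 0 then
        let toks := PySem.Str.split₀ e
        acc ++ [PySem.Str.join " " (PySem.List.slice toks none (some 1) ++
          PySem.List.sorted (PySem.List.slice toks (some 1) none ++ List.replicate k val2) (fun x => x) false)]
      else acc ++ [e]) []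
    let merged := if !p1 then merged ++ [val1 ++ " " ++ val2] else merged
    let merged := if !p3 then merged ++ [val3 ++ " " ++ val2] else merged
    let merged := PySem.List.sorted merged (fun x => x) false
    let out := merged.foldl (fun acc e =>
      if e = "" then acc
      else
        let fin := List.foldl pvSerStep ("[", false) e.toList
        let piece := if fin.2 then fin.1 ++ "}" else fin.1
        acc ++ [piece ++ "]"]) []
    PySem.Str.join "" out

-- ===== PRECONDITION & SPEC =====
def Spec_update_extensionNames (extensionName : Option String) (out : String) : Prop := out = update_extensionNames_alt extensionName
instance (extensionName : Option String) (out : String) : Decidable (Spec_update_extensionNames extensionName out) := by unfold Spec_update_extensionNames; infer_instance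

-- ===== CLAIM (what is proved, stated in full; the proofs are below) =====
def Claim_equal_update_extensionNames : Prop := ∀ (extensionName : Option String), Dom_update_extensionNames extensionName → Spec_update_extensionNames extensionName (update_extensionNames extensionName)

-- ===== LEMMAS AND PROOFS =====

-- ''.join facts about PySem.Str.join used to name A's string accumulators
theorem pvJoinCons (x : String) (l : List String) :
    PySem.Str.join "" (x :: l) = x ++ PySem.Str.join "" l := by
  rw [← String.toList_inj]
  simp [PySem.Str.join, PySem.Chars.join]
  induction l <;> simp [List.intercalate] at *

theorem pvJoinSpaceSingle (h : String) : PySem.Str.join " " [h] = h := by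
  rw [← String.toList_inj]
  simp [PySem.Str.join, PySem.Chars.join, List.intercalate]

-- A's '+= " " + val' accumulator is ' '.join of the head and the tail list
theorem pvSpaceFold (l : List String) (h : String) :
    List.foldl (fun s v => s ++ " " ++ v) h l = PySem.Str.join " " (h :: l) := by
  induction l generalizing h with
  | nil => simp [pvJoinSpaceSingle]
  | cons v t ih =>
      simp only [List.foldl_cons, ih]
      rw [← String.toList_inj]
      cases t <;> simp [PySem.Str.join, PySem.Chars.join, List.intercalate]

-- A's '+= "{" + t + "}"' accumulator is ''.join of the wrapped tokens
theorem pvBraceFold (l : List String) (s : String) :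
    List.foldl (fun nv t => nv ++ "{" ++ t ++ "}") s l
      = s ++ PySem.Str.join "" (l.map (fun t => "{" ++ t ++ "}")) := by
  induction l generalizing s with
  | nil => rw [← String.toList_inj]; simp [PySem.Str.join, PySem.Chars.join, List.intercalate]
  | cons v t ih =>
      simp only [List.foldl_cons, List.map_cons, ih, pvJoinCons]
      rw [← String.toList_inj]; simp

-- tokens of str.split() are never empty
theorem pvSplitGoNe (s : List Char) : ∀ (cur : List Char) (acc : List (List Char)),
    (∀ u ∈ acc, u ≠ []) → ∀ t ∈ PySem.Chars.split₀.go s cur acc, t ≠ [] := by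
  induction s with
  | nil =>
      intro cur acc hacc t ht
      by_cases hcur : cur.isEmpty <;>
        simp [PySem.Chars.split₀.go, hcur] at ht
      · exact hacc t ht
      · rcases ht with h | h
        all_goals first
          | exact hacc t h
          | (subst h; simpa [List.isEmpty_iff] using hcur)
  | cons c rest ih =>
      intro cur acc hacc t ht
      by_cases hsp : PySem.Chars.isspace c <;>
        simp only [PySem.Chars.split₀.go, hsp, if_true, if_false] at ht
      · by_cases hcur : cur.isEmpty <;> simp only [hcur, if_true, if_false] at ht
        · exact ih [] acc hacc t ht
        · refine ih [] (cur.reverse :: acc) ?_ t ht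
          intro u hu
          rcases List.mem_cons.1 hu with h | h
          all_goals first
            | exact hacc u h
            | (subst h; simpa [List.isEmpty_iff] using hcur)
      · exact ih (c :: cur) acc hacc t ht

theorem pvSplitTokNe (s t : String) (h : t ∈ PySem.Str.split₀ s) : t ≠ "" := by
  have h2 : t.toList ∈ (PySem.Str.split₀ s).map String.toList := List.mem_map_of_mem h
  rw [PySem.Str.split₀_map_toList] at h2
  have := pvSplitGoNe s.toList [] [] (by simp) t.toList h2
  intro hc; subst hc; simp at this

-- str.split() is nonempty as soon as the string has a non-whitespace character
theorem pvSplitGoNeNil (s : List Char) : ∀ (cur : List Char) (acc : List (List Char)),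
    (acc ≠ [] ∨ cur ≠ []) → PySem.Chars.split₀.go s cur acc ≠ [] := by
  induction s with
  | nil =>
      intro cur acc h
      by_cases hcur : cur.isEmpty <;> simp [PySem.Chars.split₀.go, hcur]
      rcases h with h | h
      · exact h
      · rw [List.isEmpty_iff] at hcur; exact absurd hcur h
  | cons c rest ih =>
      intro cur acc h
      by_cases hsp : PySem.Chars.isspace c <;>
        simp only [PySem.Chars.split₀.go, hsp, if_true, if_false]
      · by_cases hcur : cur.isEmpty <;> simp only [hcur, if_true, if_false]
        · rw [List.isEmpty_iff] at hcur
          apply ih [] acc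
          left
          rcases h with h | h
          · exact h
          · exact absurd hcur h
        · exact ih [] (cur.reverse :: acc) (Or.inl (by simp))
      · exact ih (c :: cur) acc (Or.inr (by simp))

theorem pvSplitGoNeNil' (s : List Char) : ∀ (cur : List Char) (acc : List (List Char)),
    (∃ c ∈ s, PySem.Chars.isspace c = false) → PySem.Chars.split₀.go s cur acc ≠ [] := by
  induction s with
  | nil => intro _ _ h; simp at h
  | cons c rest ih =>
      intro cur acc h
      by_cases hsp : PySem.Chars.isspace c <;>
        simp only [PySem.Chars.split₀.go, hsp, if_true, if_false]
      · rcases h with ⟨d, hd, hdsp⟩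
        rcases List.mem_cons.1 hd with h1 | h1
        · subst h1; rw [hsp] at hdsp; cases hdsp
        · by_cases hcur : cur.isEmpty <;> simp only [hcur, if_true, if_false]
          · exact ih [] acc ⟨d, h1, hdsp⟩
          · exact ih [] (cur.reverse :: acc) ⟨d, h1, hdsp⟩
      · exact pvSplitGoNeNil rest (c :: cur) acc (Or.inr (by simp))

theorem pvSplitNeNil (s : String) (c : Char) (hc : c ∈ s.toList)
    (hsp : PySem.Chars.isspace c = false) : PySem.Str.split₀ s ≠ [] := by
  intro h
  have h2 : (PySem.Str.split₀ s).map String.toList = [] := by rw [h]; rfl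
  rw [PySem.Str.split₀_map_toList] at h2
  exact pvSplitGoNeNil' s.toList [] [] ⟨c, hc, hsp⟩ h2

-- the enumerate loop that reassigns new_values[k] in place is a map
theorem pvEnumSetMapAux {α : Type} (p : α → Bool) (f : α → α) (d : α) :
    ∀ (t pre : List α),
      List.foldl (fun acc kv =>
          if p (PySem.List.pyGetD acc kv.1 d) then
            acc.set kv.1.toNat (f (PySem.List.pyGetD acc kv.1 d)) else acc)
        (pre ++ t) (PySem.List.enumerate t (pre.length : Int))
      = pre ++ t.map (fun x => if p x then f x else x) := by
  intro t
  induction t with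
  | nil => intro pre; simp [PySem.List.enumerate]
  | cons x t ih =>
      intro pre
      rw [show PySem.List.enumerate (x :: t) (pre.length : Int)
            = ((pre.length : Int), x) :: PySem.List.enumerate t ((pre.length : Int) + 1) from rfl]
      rw [List.foldl_cons]
      have hget : PySem.List.pyGetD (pre ++ x :: t) (pre.length : Int) d = x := by
        rw [PySem.List.pyGetD_natCast]; simp
      rw [hget]
      have hstep : (if p x then (pre ++ x :: t).set ((pre.length : Int)).toNat (f x) else pre ++ x :: t)
          = (pre ++ [if p x then f x else x]) ++ t := by
        by_cases hp : p x <;> simp [hp, List.set_append]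
      rw [hstep]
      have hcast : ((pre.length : Int) + 1) = (((pre ++ [if p x then f x else x]).length : Nat) : Int) := by
        simp
      rw [hcast, ih]
      simp

theorem pvEnumSetMap {α : Type} (p : α → Bool) (f : α → α) (d : α) (l : List α) :
    List.foldl (fun acc kv =>
        if p (PySem.List.pyGetD acc kv.1 d) then
          acc.set kv.1.toNat (f (PySem.List.pyGetD acc kv.1 d)) else acc)
      l (PySem.List.enumerate l)
      = l.map (fun x => if p x then f x else x) := by
  have := pvEnumSetMapAux p f d l []
  simpa using this

-- the canonical rebuilt entry: first token, then the sorted tail tokens with val2 inserted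
def pvMergeB (entry val2 : String) : String :=
  let toks := PySem.Str.split₀ entry
  PySem.Str.join " " (PySem.List.slice toks none (some 1) ++
    PySem.List.sorted (PySem.List.slice toks (some 1) none ++ [val2]) (fun x => x) false)

-- the rebuilt entry: A's accumulator equals the canonical merge, given the entry holds the guid
theorem pvMergeBodyEq (guid val2 cur : String) (c : Char) (hc : c ∈ guid.toList)
    (hsp : PySem.Chars.isspace c = false) (h : PySem.Str.isIn guid cur = true) :
    (List.foldl (fun s v => s ++ " " ++ v)
        (PySem.List.pyGetD (PySem.Str.split₀ cur) 0 "")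
        (PySem.List.sorted
          (List.foldl (fun ts f => ts ++ [PySem.List.pyGetD (PySem.Str.split₀ cur) f ""]) []
            (PySem.List.pyRange 1 (PySem.List.len (PySem.Str.split₀ cur))) ++ [val2])
          (fun x => x) false))
      = pvMergeB cur val2 := by
  have hcs : c ∈ cur.toList := by
    have hinf := (PySem.Str.isIn_iff_infix guid cur).1 h
    exact hinf.subset hc
  have hne : PySem.Str.split₀ cur ≠ [] := pvSplitNeNil cur c hcs hsp
  obtain ⟨hd, tl, htoks⟩ := List.exists_cons_of_ne_nil hne
  rw [PySem.List.foldl_pyRange_pyGetD (PySem.Str.split₀ cur) "" (fun ts t => ts ++ [t]) [] (by norm_num)]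
  rw [PySem.List.foldl_append_singleton]
  unfold pvMergeB
  rw [htoks]
  dsimp only
  rw [PySem.List.slice_to _ (by norm_num), PySem.List.slice_from _ (by norm_num)]
  have h0 : PySem.List.pyGetD (hd :: tl) 0 "" = hd := by
    simp [PySem.List.pyGetD, PySem.List.pyGet?, PySem.List.pyIdx?]
  rw [h0, pvSpaceFold]
  simp

-- the rebuilding pass over the whole list, as a function equation usable by rw
theorem pvMergeFun (guid val2 : String) (c : Char) (hc : c ∈ guid.toList)
    (hsp : PySem.Chars.isspace c = false) :
    (fun x => if PySem.Str.isIn guid x then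
        (List.foldl (fun s v => s ++ " " ++ v)
          (PySem.List.pyGetD (PySem.Str.split₀ x) 0 "")
          (PySem.List.sorted
            (List.foldl (fun ts f => ts ++ [PySem.List.pyGetD (PySem.Str.split₀ x) f ""]) []
              (PySem.List.pyRange 1 (PySem.List.len (PySem.Str.split₀ x))) ++ [val2])
            (fun x => x) false))
      else x)
    = (fun x => if PySem.Str.isIn guid x then pvMergeB x val2 else x) := by
  funext x
  by_cases hx : PySem.Str.isIn guid x <;> simp only [hx, Bool.false_eq_true, if_true, if_false]
  exact pvMergeBodyEq guid val2 x c hc hsp hx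

-- A's per-entry serialization equals the ''.join of the brace-wrapped tokens
theorem pvSerEq (e : String) :
    "[" ++ (List.foldl (fun nv q =>
        if PySem.List.pyGetD (PySem.Str.split₀ e) q "" = "" then nv
        else nv ++ "{" ++ PySem.List.pyGetD (PySem.Str.split₀ e) q "" ++ "}") ""
      (PySem.List.pyRange 0 (PySem.List.len (PySem.Str.split₀ e)))) ++ "]"
      = "[" ++ PySem.Str.join "" ((PySem.Str.split₀ e).map (fun t => "{" ++ t ++ "}")) ++ "]" := by
  rw [PySem.List.foldl_pyRange_pyGetD (PySem.Str.split₀ e) ""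
        (fun nv t => if t = "" then nv else nv ++ "{" ++ t ++ "}") "" (by norm_num)]
  rw [Int.toNat_zero, List.drop_zero]
  rw [PySem.List.foldl_congr_mem (PySem.Str.split₀ e) _ (fun nv t => nv ++ "{" ++ t ++ "}") ""
        (by intro acc x hx; simp [pvSplitTokNe e x hx])]
  rw [pvBraceFold]
  rw [← String.toList_inj]; simp

theorem pvPassEq (guid val2 : String) (c : Char) (hc : c ∈ guid.toList)
    (hsp : PySem.Chars.isspace c = false) (l : List String) :
    List.foldl (fun acc kv =>
      if PySem.Str.isIn guid (PySem.List.pyGetD acc kv.1 "") then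
        acc.set kv.1.toNat (List.foldl (fun s v => s ++ " " ++ v)
          (PySem.List.pyGetD (PySem.Str.split₀ (PySem.List.pyGetD acc kv.1 "")) 0 "")
          (PySem.List.sorted
            (List.foldl (fun ts f => ts ++ [PySem.List.pyGetD (PySem.Str.split₀ (PySem.List.pyGetD acc kv.1 "")) f ""]) []
              (PySem.List.pyRange 1 (PySem.List.len (PySem.Str.split₀ (PySem.List.pyGetD acc kv.1 "")))) ++ [val2])
            (fun x => x) false))
      else acc) l (PySem.List.enumerate l)
    = l.map (fun e => if PySem.Str.isIn guid e then pvMergeB e val2 else e) := by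
  have h := pvEnumSetMap (fun cur => PySem.Str.isIn guid cur)
    (fun cur => List.foldl (fun s v => s ++ " " ++ v)
      (PySem.List.pyGetD (PySem.Str.split₀ cur) 0 "")
      (PySem.List.sorted
        (List.foldl (fun ts f => ts ++ [PySem.List.pyGetD (PySem.Str.split₀ cur) f ""]) []
          (PySem.List.pyRange 1 (PySem.List.len (PySem.Str.split₀ cur))) ++ [val2])
        (fun x => x) false)) "" l
  rw [h, pvMergeFun guid val2 c hc hsp]

theorem pvSerPass (l : List String) :
    List.foldl (fun acc i =>
        if PySem.List.pyGetD l i "" = "" then acc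
        else acc ++ ["[" ++ (List.foldl (fun nv q =>
            if PySem.List.pyGetD (PySem.Str.split₀ (PySem.List.pyGetD l i "")) q "" = "" then nv
            else nv ++ "{" ++ PySem.List.pyGetD (PySem.Str.split₀ (PySem.List.pyGetD l i "")) q "" ++ "}") ""
          (PySem.List.pyRange 0 (PySem.List.len (PySem.Str.split₀ (PySem.List.pyGetD l i ""))))) ++ "]"]) []
      (PySem.List.pyRange 0 (PySem.List.len l))
    = (l.filter (fun e => !(e == ""))).map
        (fun e => "[" ++ PySem.Str.join "" ((PySem.Str.split₀ e).map (fun t => "{" ++ t ++ "}")) ++ "]") := by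
  have h := PySem.List.foldl_pyRange_pyGetD l ""
    (fun acc e => if e = "" then acc
      else acc ++ ["[" ++ (List.foldl (fun nv q =>
          if PySem.List.pyGetD (PySem.Str.split₀ e) q "" = "" then nv
          else nv ++ "{" ++ PySem.List.pyGetD (PySem.Str.split₀ e) q "" ++ "}") ""
        (PySem.List.pyRange 0 (PySem.List.len (PySem.Str.split₀ e)))) ++ "]"]) [] (le_refl 0)
  rw [h, Int.toNat_zero, List.drop_zero]
  rw [PySem.List.foldl_congr_mem l _
        (fun acc e => if (!(e == "")) then
            acc ++ ["[" ++ PySem.Str.join "" ((PySem.Str.split₀ e).map (fun t => "{" ++ t ++ "}")) ++ "]"]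
          else acc) []
        (by intro acc x hx
            dsimp only
            by_cases hx0 : x = ""
            · simp [hx0]
            · have hb : (x == "") = false := by simp [hx0]
              rw [if_neg hx0, hb]
              simp only [Bool.not_false, if_true]
              rw [pvSerEq x])]
  rw [PySem.List.foldl_append_if]
  simp

-- ===== parse layer: A's split('[') + replace chain equals B's character scanner =====

-- per-character substitution performed by the normalization
def pvSub (c : Char) : List Char := if c = '{' then [] else if c = '}' then [' '] else if c = ']' then [] else [c]

theorem pvReplGo (a : Char) (bs : List Char) :
    ∀ (l : List Char) (fuel : Nat) (acc : List Char), l.length ≤ fuel →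
      PySem.Chars.replace.go [a] bs fuel l acc
        = acc.reverse ++ l.flatMap (fun c => if c = a then bs else [c]) := by
  intro l
  induction l with
  | nil =>
      intro fuel acc _
      cases fuel <;> simp [PySem.Chars.replace.go]
  | cons c t ih =>
      intro fuel acc hle
      cases fuel with
      | zero => simp at hle
      | succ f =>
          by_cases hca : a = c
          · subst hca
            have hpre : [a].isPrefixOf (a :: t) = true := by simp [List.isPrefixOf]
            simp only [PySem.Chars.replace.go, hpre, if_true]
            rw [show List.drop [a].length (a :: t) = t from rfl]
            rw [ih f (bs.reverse ++ acc) (by simpa using hle)]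
            simp
          · have hpre : [a].isPrefixOf (c :: t) = false := by
              simp [List.isPrefixOf]; exact fun h => hca h
            simp only [PySem.Chars.replace.go, hpre, Bool.false_eq_true, if_false]
            rw [ih f (c :: acc) (by simpa using hle)]
            have : ¬ (c = a) := fun h => hca h.symm
            simp [this]

theorem pvReplSingle (l : List Char) (a : Char) (bs : List Char) :
    PySem.Chars.replace l [a] bs = l.flatMap (fun c => if c = a then bs else [c]) := by
  have : ([a] : List Char).isEmpty = false := rfl
  simp only [PySem.Chars.replace, this, Bool.false_eq_true, if_false]
  exact (pvReplGo a bs l l.length [] (le_refl _)).trans (by simp)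

theorem pvNormToList (i : String) :
    (PySem.Str.replace (PySem.Str.replace (PySem.Str.replace i "{" "") "}" " ") "]" "").toList
      = i.toList.flatMap pvSub := by
  simp only [PySem.Str.toList_replace]
  rw [show ("{" : String).toList = ['{'] from rfl, show ("}" : String).toList = ['}'] from rfl,
      show ("]" : String).toList = [']'] from rfl, show ("" : String).toList = [] from rfl,
      show (" " : String).toList = [' '] from rfl]
  rw [pvReplSingle, pvReplSingle, pvReplSingle, List.flatMap_assoc, List.flatMap_assoc]
  apply List.flatMap_congr
  intro c _
  by_cases h1 : c = '{'
  · simp [pvSub, h1]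
  · by_cases h2 : c = '}'
    · subst h2; simp [pvSub]
    · by_cases h3 : c = ']'
      · simp [pvSub, h1, h2, h3]
      · simp [pvSub, h1, h2, h3]

-- split on '[' as a structural recursion
def pvBrSplit : List Char → List (List Char)
  | [] => [[]]
  | c :: s => if c = '[' then [] :: pvBrSplit s else
      match pvBrSplit s with
      | [] => [[c]]
      | h :: t => (c :: h) :: t

theorem pvBrSplit_ne_nil (s : List Char) : pvBrSplit s ≠ [] := by
  cases s with
  | nil => simp [pvBrSplit]
  | cons c t =>
      by_cases h : c = '[' <;> simp [pvBrSplit, h]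
      cases pvBrSplit t <;> simp

theorem pvSplitOnGo : ∀ (l : List Char) (fuel : Nat) (cur : List Char) (acc : List (List Char)),
    l.length < fuel →
    PySem.Chars.splitOn.go ['['] fuel l cur acc
      = acc.reverse ++ (match pvBrSplit l with
          | [] => [cur.reverse]
          | h :: t => (cur.reverse ++ h) :: t) := by
  intro l
  induction l with
  | nil =>
      intro fuel cur acc _
      cases fuel <;> simp [PySem.Chars.splitOn.go, pvBrSplit]
  | cons c t ih =>
      intro fuel cur acc hlt
      cases fuel with
      | zero => simp at hlt
      | succ f =>
          by_cases hc : c = '['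
          · subst hc
            have hpre : (['['] : List Char).isPrefixOf ('[' :: t) = true := by simp [List.isPrefixOf]
            simp only [PySem.Chars.splitOn.go, hpre, if_true]
            rw [show List.drop (['['] : List Char).length ('[' :: t) = t from rfl]
            rw [ih f [] (cur.reverse :: acc) (by simpa using hlt)]
            simp only [pvBrSplit, if_true]
            rcases h : pvBrSplit t with _ | ⟨h1, t1⟩
            · exact absurd h (pvBrSplit_ne_nil t)
            · simp
          · have hpre : (['['] : List Char).isPrefixOf (c :: t) = false := by
              simp [List.isPrefixOf]; exact fun h => hc h.symm
            simp only [PySem.Chars.splitOn.go, hpre, Bool.false_eq_true, if_false]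
            rw [ih f (c :: cur) acc (by simpa using hlt)]
            simp only [pvBrSplit, hc, if_false]
            rcases h : pvBrSplit t with _ | ⟨h1, t1⟩
            · exact absurd h (pvBrSplit_ne_nil t)
            · simp

theorem pvSplitOnBr (s : List Char) : PySem.Chars.splitOn s ['['] = pvBrSplit s := by
  unfold PySem.Chars.splitOn
  rw [pvSplitOnGo s (s.length + 1) [] [] (by omega)]
  rcases h : pvBrSplit s with _ | ⟨h1, t1⟩
  · exact absurd h (pvBrSplit_ne_nil s)
  · simp

def pvNormStr (i : String) : String :=
  PySem.Str.replace (PySem.Str.replace (PySem.Str.replace i "{" "") "}" " ") "]" ""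

theorem pvNormOfList (cs : List Char) :
    pvNormStr (String.ofList cs) = String.ofList (cs.flatMap pvSub) := by
  rw [← String.toList_inj]
  unfold pvNormStr
  rw [pvNormToList]
  simp

theorem pvAEntries (en : String) :
    ((PySem.Str.split? en "[").getD []).map pvNormStr
      = (pvBrSplit en.toList).map (fun cs => String.ofList (cs.flatMap pvSub)) := by
  have h : PySem.Str.split? en "[" = some ((PySem.Chars.splitOn en.toList ['[']).map String.ofList) := by
    simp [PySem.Str.split?, PySem.Chars.split?]
  rw [h]
  simp only [Option.getD_some, List.map_map, pvSplitOnBr]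
  apply List.map_congr_left
  intro cs _
  exact pvNormOfList cs

theorem pvScanSpec : ∀ (s : List Char) (acc : List String) (cur : List Char),
    (List.foldl pvScanStep (acc, cur) s).1 ++ [String.ofList (List.foldl pvScanStep (acc, cur) s).2]
    = acc ++ (match pvBrSplit s with
        | [] => [String.ofList cur]
        | h :: t => String.ofList (cur ++ h.flatMap pvSub) :: t.map (fun cs => String.ofList (cs.flatMap pvSub))) := by
  intro s
  induction s with
  | nil => intro acc cur; simp [pvBrSplit]
  | cons c s ih =>
      intro acc cur
      by_cases h1 : c = '['
      · subst h1
        rw [List.foldl_cons, show pvScanStep (acc, cur) '[' = (acc ++ [String.ofList cur], []) from rfl]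
        rw [ih]
        simp only [pvBrSplit, if_true]
        rcases h : pvBrSplit s with _ | ⟨h1, t1⟩
        · exact absurd h (pvBrSplit_ne_nil s)
        · simp
      · have hbr : pvBrSplit (c :: s) = match pvBrSplit s with
            | [] => [[c]] | h :: t => (c :: h) :: t := by
          simp [pvBrSplit, h1]
        by_cases h2 : c = '{' ∨ c = ']'
        · rw [List.foldl_cons, show pvScanStep (acc, cur) c = (acc, cur) by
            simp [pvScanStep, h1, h2]]
          rw [ih]
          rw [hbr]
          rcases h : pvBrSplit s with _ | ⟨hh, tt⟩
          · exact absurd h (pvBrSplit_ne_nil s)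
          · have hsub : pvSub c = [] := by
              rcases h2 with h2 | h2 <;> simp [pvSub, h2]
            simp [hsub]
        · by_cases h3 : c = '}'
          · subst h3
            rw [List.foldl_cons, show pvScanStep (acc, cur) '}' = (acc, cur ++ [' ']) by
              simp [pvScanStep]]
            rw [ih, hbr]
            rcases h : pvBrSplit s with _ | ⟨hh, tt⟩
            · exact absurd h (pvBrSplit_ne_nil s)
            · have hsub : pvSub '}' = [' '] := by simp [pvSub]
              simp [hsub]
          · rw [List.foldl_cons, show pvScanStep (acc, cur) c = (acc, cur ++ [c]) by
              simp [pvScanStep, h1, h2, h3]]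
            rw [ih, hbr]
            rcases h : pvBrSplit s with _ | ⟨hh, tt⟩
            · exact absurd h (pvBrSplit_ne_nil s)
            · have hsub : pvSub c = [c] := by
                have h2a : ¬ c = '{' := fun hh => h2 (Or.inl hh)
                have h2b : ¬ c = ']' := fun hh => h2 (Or.inr hh)
                simp [pvSub, h2a, h2b, h3]
              simp [hsub]

theorem pvScanEntries (en : String) :
    (List.foldl pvScanStep ([], []) en.toList).1 ++ [String.ofList (List.foldl pvScanStep ([], []) en.toList).2]
    = ((PySem.Str.split? en "[").getD []).map pvNormStr := by
  rw [pvScanSpec, pvAEntries]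
  rcases h : pvBrSplit en.toList with _ | ⟨hh, tt⟩
  · exact absurd h (pvBrSplit_ne_nil en.toList)
  · simp

-- ===== substring / whitespace-token infrastructure =====

theorem pvGoAcc : ∀ (s cur : List Char) (acc : List (List Char)),
    PySem.Chars.split₀.go s cur acc = acc.reverse ++ PySem.Chars.split₀.go s cur [] := by
  intro s
  induction s with
  | nil =>
      intro cur acc
      by_cases hcur : cur.isEmpty <;> simp [PySem.Chars.split₀.go, hcur]
  | cons c t ih =>
      intro cur acc
      by_cases hsp : PySem.Chars.isspace c <;>
        simp only [PySem.Chars.split₀.go, hsp, if_true, Bool.false_eq_true, if_false]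
      · by_cases hcur : cur.isEmpty <;> simp only [hcur, if_true, Bool.false_eq_true, if_false]
        · exact ih [] acc
        · rw [ih [] (cur.reverse :: acc), ih [] [cur.reverse]]
          simp
      · exact ih (c :: cur) acc

theorem pvPrefixSplit : ∀ (p x b : List Char) (c : Char), c ∉ p → p <+: x ++ c :: b → p <+: x := by
  intro p
  induction p with
  | nil => intro x b c _ _; exact List.nil_prefix
  | cons q p' ih =>
      intro x b c hc hpre
      cases x with
      | nil =>
          rcases List.cons_prefix_cons.1 hpre with ⟨h1, _⟩
          exact absurd (h1 ▸ List.mem_cons_self) hc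
      | cons d x' =>
          rcases List.cons_prefix_cons.1 hpre with ⟨h1, h2⟩
          have := ih x' b c (fun h => hc (List.mem_cons_of_mem q h)) h2
          exact List.cons_prefix_cons.2 ⟨h1, this⟩

theorem pvInfixSplit (p a b : List Char) (c : Char) (hp : p ≠ []) (hc : c ∉ p) :
    (p <:+: a ++ c :: b) ↔ (p <:+: a ∨ p <:+: b) := by
  constructor
  · intro h
    induction a with
    | nil =>
        rcases (List.infix_cons_iff).1 h with h1 | h1
        · cases p with
          | nil => exact absurd rfl hp
          | cons q p' =>
              rcases List.cons_prefix_cons.1 h1 with ⟨h2, _⟩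
              exact absurd (h2 ▸ List.mem_cons_self) hc
        · exact Or.inr h1
    | cons d a' ih =>
        rcases (List.infix_cons_iff).1 h with h1 | h1
        · have := pvPrefixSplit p (d :: a') b c hc h1
          exact Or.inl this.isInfix
        · rcases ih h1 with h2 | h2
          · exact Or.inl (h2.trans (List.suffix_cons d a').isInfix)
          · exact Or.inr h2
  · intro h
    rcases h with h | h
    · exact h.trans ((List.prefix_append a (c :: b)).isInfix)
    · exact h.trans (((List.suffix_cons c b).trans (List.suffix_append a (c :: b))).isInfix)

theorem pvIsInNil (p : List Char) (hp : p ≠ []) : PySem.Chars.isIn p [] = false := by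
  rw [PySem.Chars.isIn_eq_false_iff]
  intro h
  exact hp (List.eq_nil_of_infix_nil h)

theorem pvIsInSplitChar (p a b : List Char) (c : Char) (hp : p ≠ []) (hc : c ∉ p) :
    PySem.Chars.isIn p (a ++ c :: b) = (PySem.Chars.isIn p a || PySem.Chars.isIn p b) := by
  by_cases h : p <:+: a ++ c :: b
  · have h2 := (pvInfixSplit p a b c hp hc).1 h
    rw [(PySem.Chars.isIn_iff_infix p (a ++ c :: b)).2 h]
    rcases h2 with h2 | h2
    · rw [(PySem.Chars.isIn_iff_infix p a).2 h2]; simp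
    · rw [(PySem.Chars.isIn_iff_infix p b).2 h2]; simp
  · rw [(PySem.Chars.isIn_eq_false_iff p (a ++ c :: b)).2 h]
    have ha : PySem.Chars.isIn p a = false := by
      rw [PySem.Chars.isIn_eq_false_iff]
      intro h2; exact h ((pvInfixSplit p a b c hp hc).2 (Or.inl h2))
    have hb : PySem.Chars.isIn p b = false := by
      rw [PySem.Chars.isIn_eq_false_iff]
      intro h2; exact h ((pvInfixSplit p a b c hp hc).2 (Or.inr h2))
    rw [ha, hb]; rfl

theorem pvGoAny (p : List Char) (hp : p ≠ []) (hsp : ∀ c ∈ p, PySem.Chars.isspace c = false) :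
    ∀ (s cur : List Char),
      ((PySem.Chars.split₀.go s cur []).any (fun t => PySem.Chars.isIn p t))
        = PySem.Chars.isIn p (cur.reverse ++ s) := by
  have hnot : ∀ c, PySem.Chars.isspace c = true → c ∉ p := by
    intro c hspace hmem
    rw [hsp c hmem] at hspace; cases hspace
  intro s
  induction s with
  | nil =>
      intro cur
      by_cases hcur : cur.isEmpty
      · rw [List.isEmpty_iff] at hcur
        subst hcur
        simp [PySem.Chars.split₀.go, pvIsInNil p hp]
      · simp [PySem.Chars.split₀.go, hcur]
  | cons c t ih =>
      intro cur
      by_cases hsp2 : PySem.Chars.isspace c <;>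
        simp only [PySem.Chars.split₀.go, hsp2, if_true, Bool.false_eq_true, if_false]
      · have hcp : c ∉ p := hnot c hsp2
        have hx := pvIsInSplitChar p cur.reverse t c hp hcp
        by_cases hcur : cur.isEmpty <;> simp only [hcur, if_true, Bool.false_eq_true, if_false]
        · rw [List.isEmpty_iff] at hcur
          subst hcur
          rw [ih []]
          simp only [List.reverse_nil, List.nil_append] at hx ⊢
          rw [hx, pvIsInNil p hp]
          simp
        · rw [pvGoAcc t [] [cur.reverse]]
          simp only [List.reverse_cons, List.reverse_nil, List.nil_append, List.any_append,
            List.any_cons, List.any_nil]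
          rw [ih [], hx]
          simp
      · rw [ih (c :: cur)]
        simp

theorem pvIsInTokensC (p : List Char) (hp : p ≠ []) (hsp : ∀ c ∈ p, PySem.Chars.isspace c = false)
    (cs : List Char) :
    PySem.Chars.isIn p cs = (PySem.Chars.split₀ cs).any (fun t => PySem.Chars.isIn p t) := by
  rw [PySem.Chars.split₀, pvGoAny p hp hsp cs []]
  simp

-- Str-level: 'p in e' is a disjunction over the whitespace-split tokens of e
theorem pvIsInTokensS (p : String) (hp : p ≠ "") (hsp : ∀ c ∈ p.toList, PySem.Chars.isspace c = false)
    (e : String) :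
    PySem.Str.isIn p e = (PySem.Str.split₀ e).any (fun t => PySem.Str.isIn p t) := by
  have hp' : p.toList ≠ [] := by
    intro h; exact hp (by rw [← String.toList_inj]; simpa using h)
  calc PySem.Str.isIn p e = PySem.Chars.isIn p.toList e.toList := rfl
    _ = (PySem.Chars.split₀ e.toList).any (fun t => PySem.Chars.isIn p.toList t) :=
        pvIsInTokensC p.toList hp' hsp e.toList
    _ = (PySem.Str.split₀ e).any (fun t => PySem.Str.isIn p t) := by
        rw [PySem.Str.split₀, List.any_map]
        apply congrArg
        funext t
        simp [Function.comp, PySem.Str.isIn]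

-- tokens of str.split() contain no whitespace
theorem pvGoSpacefree (s : List Char) : ∀ (cur : List Char) (acc : List (List Char)),
    (∀ t ∈ acc, ∀ c ∈ t, PySem.Chars.isspace c = false) →
    (∀ c ∈ cur, PySem.Chars.isspace c = false) →
    ∀ t ∈ PySem.Chars.split₀.go s cur acc, ∀ c ∈ t, PySem.Chars.isspace c = false := by
  induction s with
  | nil =>
      intro cur acc hacc hcur t ht
      by_cases hc : cur.isEmpty <;> simp [PySem.Chars.split₀.go, hc] at ht
      · exact hacc t ht
      · rcases ht with h | h
        · exact hacc t h
        · subst h; intro c hcmem; exact hcur c (by simpa using hcmem)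
  | cons c rest ih =>
      intro cur acc hacc hcur t ht
      by_cases hsp : PySem.Chars.isspace c <;>
        simp only [PySem.Chars.split₀.go, hsp, if_true, Bool.false_eq_true, if_false] at ht
      · by_cases hc : cur.isEmpty <;> simp only [hc, if_true, Bool.false_eq_true, if_false] at ht
        · exact ih [] acc hacc (by simp) t ht
        · refine ih [] (cur.reverse :: acc) ?_ (by simp) t ht
          intro u hu
          rcases List.mem_cons.1 hu with h | h
          · subst h; intro d hd; exact hcur d (by simpa using hd)
          · exact hacc u h
      · refine ih (c :: cur) acc hacc ?_ t ht
        intro d hd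
        rcases List.mem_cons.1 hd with h | h
        · subst h; simpa using hsp
        · exact hcur d h

theorem pvTokSpacefree (e t : String) (h : t ∈ PySem.Str.split₀ e) :
    ∀ c ∈ t.toList, PySem.Chars.isspace c = false := by
  have h2 : t.toList ∈ (PySem.Str.split₀ e).map String.toList := List.mem_map_of_mem h
  rw [PySem.Str.split₀_map_toList] at h2
  exact pvGoSpacefree e.toList [] [] (by simp) (by simp) t.toList h2

-- split₀ consumes a whitespace-free block into cur
theorem pvGoConsume : ∀ (t : List Char), (∀ c ∈ t, PySem.Chars.isspace c = false) →
    ∀ (s cur : List Char) (acc : List (List Char)),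
      PySem.Chars.split₀.go (t ++ s) cur acc = PySem.Chars.split₀.go s (t.reverse ++ cur) acc := by
  intro t
  induction t with
  | nil => intro _ s cur acc; simp
  | cons c t' ih =>
      intro h s cur acc
      have hc : PySem.Chars.isspace c = false := h c List.mem_cons_self
      simp only [List.cons_append, PySem.Chars.split₀.go, hc, Bool.false_eq_true, if_false]
      rw [ih (fun d hd => h d (List.mem_cons_of_mem c hd)) s (c :: cur) acc]
      simp

-- split() is a left inverse of ' '.join on nonempty whitespace-free tokens
theorem pvRoundtripC : ∀ (ts : List (List Char)),
    (∀ t ∈ ts, t ≠ [] ∧ ∀ c ∈ t, PySem.Chars.isspace c = false) →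
    PySem.Chars.split₀ (PySem.Chars.join [' '] ts) = ts := by
  intro ts
  induction ts with
  | nil => intro _; rfl
  | cons t ts' ih =>
      intro h
      rcases h t List.mem_cons_self with ⟨hne, hsf⟩
      have hne' : (t.reverse ++ ([] : List Char)).isEmpty = false := by
        simp [List.isEmpty_iff]; exact hne
      cases ts' with
      | nil =>
          rw [show PySem.Chars.join [' '] [t] = t from PySem.Chars.join_singleton [' '] t]
          rw [PySem.Chars.split₀, show (t : List Char) = t ++ [] by simp, pvGoConsume t hsf [] [] []]
          simp [PySem.Chars.split₀.go, hne', hne]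
      | cons u ts'' =>
          have hjoin : PySem.Chars.join [' '] (t :: u :: ts'')
              = t ++ ' ' :: PySem.Chars.join [' '] (u :: ts'') := by
            rw [PySem.Chars.join_cons_cons]
            simp
          rw [hjoin, PySem.Chars.split₀, pvGoConsume t hsf _ [] []]
          have hsp : PySem.Chars.isspace ' ' = true := by decide
          simp only [PySem.Chars.split₀.go, hsp, if_true, hne', Bool.false_eq_true, if_false]
          rw [pvGoAcc]
          have hrec := ih (fun u hu => h u (List.mem_cons_of_mem t hu))
          rw [PySem.Chars.split₀] at hrec
          rw [hrec]
          simp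

theorem pvRoundtripS (parts : List String)
    (h : ∀ t ∈ parts, t ≠ "" ∧ ∀ c ∈ t.toList, PySem.Chars.isspace c = false) :
    PySem.Str.split₀ (PySem.Str.join " " parts) = parts := by
  rw [PySem.Str.split₀, PySem.Str.join]
  have h1 : (String.ofList (PySem.Chars.join (" ".toList) (parts.map String.toList))).toList
      = PySem.Chars.join [' '] (parts.map String.toList) := by simp
  rw [h1, pvRoundtripC (parts.map String.toList) (by
    intro t ht
    rcases List.mem_map.1 ht with ⟨u, hu, rfl⟩
    rcases h u hu with ⟨h1, h2⟩
    refine ⟨?_, h2⟩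
    intro hnil
    exact h1 (by rw [← String.toList_inj]; simpa using hnil))]
  have h2 : (String.ofList ∘ String.toList) = (id : String → String) := by
    funext s; simp
  rw [List.map_map, h2, List.map_id]

-- 'p in ' '.join(ts)' is a disjunction over ts, for space-free nonempty p
theorem pvIsInJoinC (p : List Char) (hp : p ≠ []) (hspace : ' ' ∉ p) :
    ∀ (ts : List (List Char)),
      PySem.Chars.isIn p (PySem.Chars.join [' '] ts) = ts.any (fun t => PySem.Chars.isIn p t) := by
  intro ts
  induction ts with
  | nil =>
      rw [show PySem.Chars.join [' '] [] = [] from PySem.Chars.join_nil [' ']]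
      simp [pvIsInNil p hp]
  | cons t ts' ih =>
      cases ts' with
      | nil =>
          rw [show PySem.Chars.join [' '] [t] = t from PySem.Chars.join_singleton [' '] t]
          simp
      | cons u ts'' =>
          have hjoin : PySem.Chars.join [' '] (t :: u :: ts'')
              = t ++ ' ' :: PySem.Chars.join [' '] (u :: ts'') := by
            rw [PySem.Chars.join_cons_cons]
            simp
          rw [hjoin, pvIsInSplitChar p t _ ' ' hp hspace, ih]
          simp

theorem pvIsInJoinS (p : String) (hp : p ≠ "") (hspace : ' ' ∉ p.toList) (ts : List String) :
    PySem.Str.isIn p (PySem.Str.join " " ts) = ts.any (fun t => PySem.Str.isIn p t) := by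
  have hp' : p.toList ≠ [] := by
    intro h; exact hp (by rw [← String.toList_inj]; simpa using h)
  have h1 : (PySem.Str.join " " ts).toList = PySem.Chars.join [' '] (ts.map String.toList) := by
    simp [PySem.Str.join]
  calc PySem.Str.isIn p (PySem.Str.join " " ts)
      = PySem.Chars.isIn p.toList (PySem.Str.join " " ts).toList := rfl
    _ = PySem.Chars.isIn p.toList (PySem.Chars.join [' '] (ts.map String.toList)) := by rw [h1]
    _ = (ts.map String.toList).any (fun t => PySem.Chars.isIn p.toList t) :=
        pvIsInJoinC p.toList hp' hspace _
    _ = ts.any (fun t => PySem.Str.isIn p t) := by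
        rw [List.any_map]
        apply congrArg
        funext t
        simp [Function.comp, PySem.Str.isIn]

-- any is invariant under sorting
theorem pvAnySorted (xs : List String) (f : String → Bool) :
    (PySem.List.sorted xs (fun x => x) false).any f = xs.any f := by
  exact List.Perm.any_eq (PySem.List.sorted_perm xs (fun x => x) false)

-- ===== merge layer: A's two rebuild passes equal B's counted single rebuild =====

-- literal facts about the three guids
theorem pvV2ne : ("CAB54552-DEEA-4691-817E-ED4A4D1AFC72" : String) ≠ "" := by decide
theorem pvV2sf : ∀ c ∈ ("CAB54552-DEEA-4691-817E-ED4A4D1AFC72" : String).toList,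
    PySem.Chars.isspace c = false := by simp [PySem.Chars.isspace]
theorem pvV3ne : ("AADCED64-746C-4633-A97C-D61349046527" : String) ≠ "" := by decide
theorem pvV3sf : ∀ c ∈ ("AADCED64-746C-4633-A97C-D61349046527" : String).toList,
    PySem.Chars.isspace c = false := by simp [PySem.Chars.isspace]
theorem pvV3nospace : (' ' : Char) ∉ ("AADCED64-746C-4633-A97C-D61349046527" : String).toList := by
  decide
theorem pvV3notinV2 : PySem.Str.isIn "AADCED64-746C-4633-A97C-D61349046527"
    "CAB54552-DEEA-4691-817E-ED4A4D1AFC72" = false := by decide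

-- the canonical merge, written on an explicit head :: tail token list
theorem pvMergeTokens (e hd : String) (tl : List String) (v : String)
    (hsplit : PySem.Str.split₀ e = hd :: tl) :
    pvMergeB e v = PySem.Str.join " " (hd :: PySem.List.sorted (tl ++ [v]) (fun x => x) false) := by
  unfold pvMergeB
  rw [hsplit]
  dsimp only
  rw [PySem.List.slice_to _ (by norm_num), PySem.List.slice_from _ (by norm_num)]
  simp

-- tokens of the merged entry: head, then the sorted tail with val2 inserted
theorem pvSplitMergeTok (e hd : String) (tl : List String)
    (hsplit : PySem.Str.split₀ e = hd :: tl) :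
    PySem.Str.split₀ (PySem.Str.join " "
        (hd :: PySem.List.sorted (tl ++ ["CAB54552-DEEA-4691-817E-ED4A4D1AFC72"]) (fun x => x) false))
      = hd :: PySem.List.sorted (tl ++ ["CAB54552-DEEA-4691-817E-ED4A4D1AFC72"]) (fun x => x) false := by
  apply pvRoundtripS
  intro t ht
  rcases List.mem_cons.1 ht with rfl | ht
  · exact ⟨pvSplitTokNe e t (hsplit ▸ List.mem_cons_self),
      pvTokSpacefree e t (hsplit ▸ List.mem_cons_self)⟩
  · rw [PySem.List.mem_sorted] at ht
    rcases List.mem_append.1 ht with ht | ht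
    · have hmem : t ∈ PySem.Str.split₀ e := hsplit ▸ List.mem_cons_of_mem hd ht
      exact ⟨pvSplitTokNe e t hmem, pvTokSpacefree e t hmem⟩
    · rcases List.mem_singleton.1 ht with rfl
      exact ⟨pvV2ne, pvV2sf⟩

-- membership of val3 survives the val1 merge
theorem pvIsInMergeEq (e hd : String) (tl : List String)
    (hsplit : PySem.Str.split₀ e = hd :: tl) :
    PySem.Str.isIn "AADCED64-746C-4633-A97C-D61349046527"
        (PySem.Str.join " "
          (hd :: PySem.List.sorted (tl ++ ["CAB54552-DEEA-4691-817E-ED4A4D1AFC72"]) (fun x => x) false))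
      = PySem.Str.isIn "AADCED64-746C-4633-A97C-D61349046527" e := by
  rw [pvIsInJoinS _ pvV3ne pvV3nospace]
  rw [pvIsInTokensS _ pvV3ne pvV3sf e, hsplit]
  simp only [List.any_cons]
  rw [pvAnySorted]
  simp only [List.any_append, List.any_cons, List.any_nil, pvV3notinV2, Bool.or_false]

-- inserting twice, re-sorting in between, is inserting two copies once
theorem pvSortedTwice (tl : List String) (v : String) :
    PySem.List.sorted (PySem.List.sorted (tl ++ [v]) (fun x => x) false ++ [v]) (fun x => x) false
      = PySem.List.sorted (tl ++ [v, v]) (fun x => x) false := by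
  have hp : (PySem.List.sorted (tl ++ [v]) (fun x => x) false ++ [v]).Perm (tl ++ [v, v]) := by
    have h1 := (PySem.List.sorted_perm (tl ++ [v]) (fun x => x) false).append_right [v]
    simpa using h1
  exact PySem.List.sorted_eq_sorted_of_perm _ _ _ (fun a b h => h) hp

-- B's counted per-entry rebuild equals the composition of A's two per-entry rebuilds
theorem pvCompose (e : String) :
    (fun x => if PySem.Str.isIn "AADCED64-746C-4633-A97C-D61349046527" x
        then pvMergeB x "CAB54552-DEEA-4691-817E-ED4A4D1AFC72" else x)
      ((fun x => if PySem.Str.isIn "00000000-0000-0000-0000-000000000000" x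
        then pvMergeB x "CAB54552-DEEA-4691-817E-ED4A4D1AFC72" else x) e)
    = (if ((if PySem.Str.isIn "00000000-0000-0000-0000-000000000000" e then 1 else 0)
          + (if PySem.Str.isIn "AADCED64-746C-4633-A97C-D61349046527" e then 1 else 0) : Nat) ≠ 0 then
        PySem.Str.join " " (PySem.List.slice (PySem.Str.split₀ e) none (some 1) ++
          PySem.List.sorted (PySem.List.slice (PySem.Str.split₀ e) (some 1) none ++
            List.replicate ((if PySem.Str.isIn "00000000-0000-0000-0000-000000000000" e then 1 else 0)
              + (if PySem.Str.isIn "AADCED64-746C-4633-A97C-D61349046527" e then 1 else 0))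
            "CAB54552-DEEA-4691-817E-ED4A4D1AFC72") (fun x => x) false)
      else e) := by
  dsimp only
  by_cases h1 : PySem.Str.isIn "00000000-0000-0000-0000-000000000000" e
  · have hnn : PySem.Str.split₀ e ≠ [] := by
      apply pvSplitNeNil e '0'
      · have hinf := (PySem.Str.isIn_iff_infix _ e).1 h1
        exact hinf.subset (by decide)
      · decide
    obtain ⟨hd, tl, hsplit⟩ := List.exists_cons_of_ne_nil hnn
    have hm := pvMergeTokens e hd tl "CAB54552-DEEA-4691-817E-ED4A4D1AFC72" hsplit
    by_cases h3 : PySem.Str.isIn "AADCED64-746C-4633-A97C-D61349046527" e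
    · simp only [if_pos h1]
      rw [hm, pvIsInMergeEq e hd tl hsplit]
      simp only [if_pos h3]
      rw [pvMergeTokens _ hd _ _ (pvSplitMergeTok e hd tl hsplit)]
      rw [pvSortedTwice, hsplit]
      rw [PySem.List.slice_to _ (by norm_num), PySem.List.slice_from _ (by norm_num)]
      norm_num [List.replicate]
    · simp only [if_pos h1]
      rw [hm, pvIsInMergeEq e hd tl hsplit]
      simp only [if_neg h3]
      rw [hsplit]
      rw [PySem.List.slice_to _ (by norm_num), PySem.List.slice_from _ (by norm_num)]
      norm_num [List.replicate]
  · simp only [if_neg h1]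
    by_cases h3 : PySem.Str.isIn "AADCED64-746C-4633-A97C-D61349046527" e
    · have hnn : PySem.Str.split₀ e ≠ [] := by
        apply pvSplitNeNil e 'A'
        · have hinf := (PySem.Str.isIn_iff_infix _ e).1 h3
          exact hinf.subset (by decide)
        · decide
      obtain ⟨hd, tl, hsplit⟩ := List.exists_cons_of_ne_nil hnn
      simp only [if_pos h3]
      rw [pvMergeTokens e hd tl _ hsplit, hsplit]
      rw [PySem.List.slice_to _ (by norm_num), PySem.List.slice_from _ (by norm_num)]
      norm_num [List.replicate]
    · simp only [if_neg h3]
      norm_num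
-- ===== serializer layer: B's character machine equals the brace-join of the tokens =====

def pvClose (st : String × Bool) : String := if st.2 then st.1 ++ "}" else st.1

theorem pvSerGo : ∀ (s : List Char),
    (∀ p : String, pvClose (List.foldl pvSerStep (p, false) s)
        = p ++ PySem.Str.join "" ((PySem.Chars.split₀.go s [] []).map
            (fun t => "{" ++ String.ofList t ++ "}")))
    ∧ (∀ (p : String) (cur : List Char), cur ≠ [] →
        pvClose (List.foldl pvSerStep (p ++ "{" ++ String.ofList cur.reverse, true) s)
          = p ++ PySem.Str.join "" ((PySem.Chars.split₀.go s cur []).map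
              (fun t => "{" ++ String.ofList t ++ "}"))) := by
  intro s
  induction s with
  | nil =>
      constructor
      · intro p
        simp only [List.foldl_nil, pvClose, Bool.false_eq_true, if_false]
        rw [show PySem.Chars.split₀.go [] [] [] = [] from rfl]
        rw [← String.toList_inj]; simp [PySem.Str.join, PySem.Chars.join, List.intercalate]
      · intro p cur hne
        simp only [List.foldl_nil, pvClose, if_true]
        have hcur : cur.isEmpty = false := by simp [List.isEmpty_iff]; exact hne
        rw [show PySem.Chars.split₀.go [] cur [] = [cur.reverse] by
          simp [PySem.Chars.split₀.go, hcur]]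
        rw [← String.toList_inj]; simp [PySem.Str.join, PySem.Chars.join, List.intercalate]
  | cons c s ih =>
      rcases ih with ⟨ih1, ih2⟩
      by_cases hsp : PySem.Chars.isspace c
      · constructor
        · intro p
          rw [List.foldl_cons, show pvSerStep (p, false) c = (p, false) by simp [pvSerStep, hsp]]
          rw [ih1 p]
          rw [show PySem.Chars.split₀.go (c :: s) [] []
                = PySem.Chars.split₀.go s [] [] by simp [PySem.Chars.split₀.go, hsp]]
        · intro p cur hne
          rw [List.foldl_cons, show pvSerStep (p ++ "{" ++ String.ofList cur.reverse, true) c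
                = (p ++ "{" ++ String.ofList cur.reverse ++ "}", false) by simp [pvSerStep, hsp]]
          rw [ih1 (p ++ "{" ++ String.ofList cur.reverse ++ "}")]
          have hcur : cur.isEmpty = false := by simp [List.isEmpty_iff]; exact hne
          rw [show PySem.Chars.split₀.go (c :: s) cur []
                = PySem.Chars.split₀.go s [] [cur.reverse] by
              simp [PySem.Chars.split₀.go, hsp, hcur]]
          rw [pvGoAcc s [] [cur.reverse]]
          rw [show ([cur.reverse] : List (List Char)).reverse ++ PySem.Chars.split₀.go s [] []
                = cur.reverse :: PySem.Chars.split₀.go s [] [] by simp]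
          rw [List.map_cons, pvJoinCons]
          rw [← String.toList_inj]; simp
      · constructor
        · intro p
          rw [List.foldl_cons, show pvSerStep (p, false) c = ((p ++ "{") ++ String.ofList [c], true) by
            simp [pvSerStep, hsp]]
          rw [show (p ++ "{") ++ String.ofList [c] = p ++ "{" ++ String.ofList ([c].reverse) by
            rw [← String.toList_inj]; simp]
          rw [ih2 p [c] (by simp)]
          rw [show PySem.Chars.split₀.go (c :: s) [] [] = PySem.Chars.split₀.go s [c] [] by
            simp [PySem.Chars.split₀.go, hsp]]
        · intro p cur hne
          rw [List.foldl_cons, show pvSerStep (p ++ "{" ++ String.ofList cur.reverse, true) c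
                = (p ++ "{" ++ String.ofList cur.reverse ++ String.ofList [c], true) by
              simp [pvSerStep, hsp]]
          rw [show p ++ "{" ++ String.ofList cur.reverse ++ String.ofList [c]
                = p ++ "{" ++ String.ofList ((c :: cur).reverse) by
              rw [← String.toList_inj]; simp]
          rw [ih2 p (c :: cur) (by simp)]
          rw [show PySem.Chars.split₀.go (c :: s) cur [] = PySem.Chars.split₀.go s (c :: cur) [] by
            simp [PySem.Chars.split₀.go, hsp]]

theorem pvSerEntry (e : String) :
    ((if (List.foldl pvSerStep ("[", false) e.toList).2
        then (List.foldl pvSerStep ("[", false) e.toList).1 ++ "}"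
        else (List.foldl pvSerStep ("[", false) e.toList).1) ++ "]")
      = "[" ++ PySem.Str.join "" ((PySem.Str.split₀ e).map (fun t => "{" ++ t ++ "}")) ++ "]" := by
  have h := (pvSerGo e.toList).1 "["
  rw [pvClose] at h
  rw [h]
  rw [PySem.Str.split₀, PySem.Chars.split₀, List.map_map]
  rfl

-- ===== generic fold shapes used by B =====

theorem pvFoldBranch {α β : Type} (c : α → Prop) [DecidablePred c] (f g : α → β) :
    ∀ (l : List α) (acc : List β),
      List.foldl (fun acc e => if c e then acc ++ [f e] else acc ++ [g e]) acc l
        = acc ++ l.map (fun e => if c e then f e else g e) := by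
  intro l
  induction l with
  | nil => intro acc; simp
  | cons x t ih =>
      intro acc
      rw [List.foldl_cons]
      by_cases h : c x
      · rw [if_pos h, ih, List.map_cons, if_pos h]
        simp
      · rw [if_neg h, ih, List.map_cons, if_neg h]
        simp

theorem pvFoldSkip {α β : Type} (c : α → Prop) [DecidablePred c] (f : α → β) :
    ∀ (l : List α) (acc : List β),
      List.foldl (fun acc e => if c e then acc else acc ++ [f e]) acc l
        = acc ++ (l.filter (fun e => !(decide (c e)))).map f := by
  intro l
  induction l with
  | nil => intro acc; simp
  | cons x t ih =>
      intro acc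
      rw [List.foldl_cons]
      by_cases h : c x
      · rw [if_pos h, ih, List.filter_cons]
        simp [h]
      · rw [if_neg h, ih, List.filter_cons]
        simp [h]

theorem pvV3notinA1 : PySem.Str.isIn "AADCED64-746C-4633-A97C-D61349046527"
    ("00000000-0000-0000-0000-000000000000" ++ " " ++ "CAB54552-DEEA-4691-817E-ED4A4D1AFC72")
      = false := by decide

-- B's counted body when only val1 can count
theorem pvBodySingle1 (e : String) :
    (if ((if PySem.Str.isIn "00000000-0000-0000-0000-000000000000" e then 1 else 0) + 0 : Nat) ≠ 0 then
        PySem.Str.join " " (PySem.List.slice (PySem.Str.split₀ e) none (some 1) ++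
          PySem.List.sorted (PySem.List.slice (PySem.Str.split₀ e) (some 1) none ++
            List.replicate ((if PySem.Str.isIn "00000000-0000-0000-0000-000000000000" e then 1 else 0) + 0)
            "CAB54552-DEEA-4691-817E-ED4A4D1AFC72") (fun x => x) false)
      else e)
    = (if PySem.Str.isIn "00000000-0000-0000-0000-000000000000" e
        then pvMergeB e "CAB54552-DEEA-4691-817E-ED4A4D1AFC72" else e) := by
  by_cases h : PySem.Str.isIn "00000000-0000-0000-0000-000000000000" e
  · simp only [if_pos h]
    norm_num
    unfold pvMergeB
    norm_num [List.replicate]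
  · simp only [if_neg h]
    norm_num

-- B's counted body when only val3 can count
theorem pvBodySingle3 (e : String) :
    (if ((0 + (if PySem.Str.isIn "AADCED64-746C-4633-A97C-D61349046527" e then 1 else 0)) : Nat) ≠ 0 then
        PySem.Str.join " " (PySem.List.slice (PySem.Str.split₀ e) none (some 1) ++
          PySem.List.sorted (PySem.List.slice (PySem.Str.split₀ e) (some 1) none ++
            List.replicate (0 + (if PySem.Str.isIn "AADCED64-746C-4633-A97C-D61349046527" e then 1 else 0))
            "CAB54552-DEEA-4691-817E-ED4A4D1AFC72") (fun x => x) false)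
      else e)
    = (if PySem.Str.isIn "AADCED64-746C-4633-A97C-D61349046527" e
        then pvMergeB e "CAB54552-DEEA-4691-817E-ED4A4D1AFC72" else e) := by
  by_cases h : PySem.Str.isIn "AADCED64-746C-4633-A97C-D61349046527" e
  · simp only [if_pos h]
    norm_num
    unfold pvMergeB
    norm_num [List.replicate]
  · simp only [if_neg h]
    norm_num

-- explicit-lambda form of the scanner characterization
theorem pvScanEntries' (en : String) :
    (List.foldl pvScanStep ([], []) en.toList).1
        ++ [String.ofList (List.foldl pvScanStep ([], []) en.toList).2]
    = ((PySem.Str.split? en "[").getD []).map (fun i =>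
        PySem.Str.replace (PySem.Str.replace (PySem.Str.replace i "{" "") "}" " ") "]" "") := by
  rw [pvScanEntries]
  apply List.map_congr_left
  intro i _
  rfl

-- the two serialization stages produce the same list of bracketed pieces
theorem pvSerSides (Y : List String) :
    (Y.filter (fun e => !(e == ""))).map
        (fun e => "[" ++ PySem.Str.join "" ((PySem.Str.split₀ e).map (fun t => "{" ++ t ++ "}")) ++ "]")
      = (Y.filter (fun e => !(decide (e = "")))).map
        (fun e => ((if (List.foldl pvSerStep ("[", false) e.toList).2
            then (List.foldl pvSerStep ("[", false) e.toList).1 ++ "}"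
            else (List.foldl pvSerStep ("[", false) e.toList).1) ++ "]")) := by
  rw [show Y.filter (fun e => !(e == "")) = Y.filter (fun e => !(decide (e = ""))) from
    List.filter_congr (by intro x _; by_cases h : x = "" <;> simp [h])]
  apply List.map_congr_left
  intro e _
  exact (pvSerEntry e).symm

-- ===== VERDICT (by name: the statement is the Claim_ definition above) =====
theorem update_extensionNames_spec : Claim_equal_update_extensionNames := by
  intro extensionName _
  unfold Spec_update_extensionNames update_extensionNames update_extensionNames_alt
  dsimp only
  generalize (match extensionName with | none => "" | some s => s) = en
  by_cases hv2 : PySem.Str.isIn "CAB54552-DEEA-4691-817E-ED4A4D1AFC72" en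
  · simp only [hv2, Bool.not_true, Bool.false_eq_true, if_false, if_true]
  · simp only [hv2, Bool.not_false, Bool.false_eq_true, if_false, if_true]
    by_cases hp1 : PySem.Str.isIn "00000000-0000-0000-0000-000000000000" en
    · by_cases hp3 : PySem.Str.isIn "AADCED64-746C-4633-A97C-D61349046527" en
      · -- both guids present: A merges twice, B counts two insertions
        simp only [hp1, hp3, Bool.not_true, Bool.false_eq_true, if_false, Bool.true_and]
        rw [pvPassEq "00000000-0000-0000-0000-000000000000"
              "CAB54552-DEEA-4691-817E-ED4A4D1AFC72" '0' (by decide) (by decide)]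
        rw [pvPassEq "AADCED64-746C-4633-A97C-D61349046527"
              "CAB54552-DEEA-4691-817E-ED4A4D1AFC72" 'A' (by decide) (by decide)]
        simp only [PySem.List.foldl_append_singleton_eq_map, List.nil_append]
        rw [pvScanEntries' en]
        generalize ((PySem.Str.split? en "[").getD []).map (fun i =>
            PySem.Str.replace (PySem.Str.replace (PySem.Str.replace i "{" "") "}" " ") "]" "") = l
        rw [pvFoldBranch]
        rw [List.nil_append]
        rw [show (l.map (fun e => if PySem.Str.isIn "00000000-0000-0000-0000-000000000000" e then
              pvMergeB e "CAB54552-DEEA-4691-817E-ED4A4D1AFC72" else e)).map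
              (fun e => if PySem.Str.isIn "AADCED64-746C-4633-A97C-D61349046527" e then
                pvMergeB e "CAB54552-DEEA-4691-817E-ED4A4D1AFC72" else e)
            = l.map (fun e =>
              if ((if PySem.Str.isIn "00000000-0000-0000-0000-000000000000" e then 1 else 0)
                  + (if PySem.Str.isIn "AADCED64-746C-4633-A97C-D61349046527" e then 1 else 0) : Nat) ≠ 0 then
                PySem.Str.join " " (PySem.List.slice (PySem.Str.split₀ e) none (some 1) ++
                  PySem.List.sorted (PySem.List.slice (PySem.Str.split₀ e) (some 1) none ++
                    List.replicate ((if PySem.Str.isIn "00000000-0000-0000-0000-000000000000" e then 1 else 0)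
                      + (if PySem.Str.isIn "AADCED64-746C-4633-A97C-D61349046527" e then 1 else 0))
                    "CAB54552-DEEA-4691-817E-ED4A4D1AFC72") (fun x => x) false)
              else e) from by
          rw [List.map_map]
          apply List.map_congr_left
          intro e _
          simpa using pvCompose e]
        rw [pvSerPass, pvFoldSkip (fun e => e = "")
            (fun e => ((if (List.foldl pvSerStep ("[", false) e.toList).2
                then (List.foldl pvSerStep ("[", false) e.toList).1 ++ "}"
                else (List.foldl pvSerStep ("[", false) e.toList).1) ++ "]")),
          List.nil_append, pvSerSides]
      · -- only val1 present
        have hp3' : PySem.Str.isIn "AADCED64-746C-4633-A97C-D61349046527" en = false := by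
          revert hp3; cases PySem.Str.isIn "AADCED64-746C-4633-A97C-D61349046527" en <;> simp
        simp only [hp1, hp3', Bool.not_true, Bool.not_false, Bool.false_eq_true, if_false, if_true,
          Bool.true_and, Bool.false_and]
        rw [pvPassEq "00000000-0000-0000-0000-000000000000"
              "CAB54552-DEEA-4691-817E-ED4A4D1AFC72" '0' (by decide) (by decide)]
        simp only [PySem.List.foldl_append_singleton_eq_map, List.nil_append]
        rw [pvScanEntries' en]
        generalize ((PySem.Str.split? en "[").getD []).map (fun i =>
            PySem.Str.replace (PySem.Str.replace (PySem.Str.replace i "{" "") "}" " ") "]" "") = l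
        rw [pvFoldBranch]
        rw [List.nil_append]
        rw [show l.map (fun e =>
              if ((if PySem.Str.isIn "00000000-0000-0000-0000-000000000000" e then 1 else 0) + 0 : Nat) ≠ 0 then
                PySem.Str.join " " (PySem.List.slice (PySem.Str.split₀ e) none (some 1) ++
                  PySem.List.sorted (PySem.List.slice (PySem.Str.split₀ e) (some 1) none ++
                    List.replicate ((if PySem.Str.isIn "00000000-0000-0000-0000-000000000000" e then 1 else 0) + 0)
                    "CAB54552-DEEA-4691-817E-ED4A4D1AFC72") (fun x => x) false)
              else e)
            = l.map (fun e => if PySem.Str.isIn "00000000-0000-0000-0000-000000000000" e then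
                pvMergeB e "CAB54552-DEEA-4691-817E-ED4A4D1AFC72" else e) from by
          apply List.map_congr_left
          intro e _
          exact pvBodySingle1 e]
        rw [pvSerPass, pvFoldSkip (fun e => e = "")
            (fun e => ((if (List.foldl pvSerStep ("[", false) e.toList).2
                then (List.foldl pvSerStep ("[", false) e.toList).1 ++ "}"
                else (List.foldl pvSerStep ("[", false) e.toList).1) ++ "]")),
          List.nil_append, pvSerSides]
    · have hp1' : PySem.Str.isIn "00000000-0000-0000-0000-000000000000" en = false := by
        revert hp1; cases PySem.Str.isIn "00000000-0000-0000-0000-000000000000" en <;> simp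
      by_cases hp3 : PySem.Str.isIn "AADCED64-746C-4633-A97C-D61349046527" en
      · -- only val3 present; A's val3 pass also walks the appended val1 entry
        simp only [hp1', hp3, Bool.not_true, Bool.not_false, Bool.false_eq_true, if_false, if_true,
          Bool.true_and, Bool.false_and]
        rw [pvPassEq "AADCED64-746C-4633-A97C-D61349046527"
              "CAB54552-DEEA-4691-817E-ED4A4D1AFC72" 'A' (by decide) (by decide)]
        simp only [PySem.List.foldl_append_singleton_eq_map, List.nil_append]
        rw [pvScanEntries' en]
        generalize ((PySem.Str.split? en "[").getD []).map (fun i =>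
            PySem.Str.replace (PySem.Str.replace (PySem.Str.replace i "{" "") "}" " ") "]" "") = l
        rw [pvFoldBranch]
        rw [List.nil_append]
        rw [List.map_append]
        rw [show ([("00000000-0000-0000-0000-000000000000" : String) ++ " " ++
              "CAB54552-DEEA-4691-817E-ED4A4D1AFC72"] : List String).map
              (fun e => if PySem.Str.isIn "AADCED64-746C-4633-A97C-D61349046527" e then
                pvMergeB e "CAB54552-DEEA-4691-817E-ED4A4D1AFC72" else e)
            = [("00000000-0000-0000-0000-000000000000" : String) ++ " " ++
              "CAB54552-DEEA-4691-817E-ED4A4D1AFC72"] from by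
          simp only [List.map_cons, List.map_nil, pvV3notinA1, Bool.false_eq_true, if_false]]
        rw [show l.map (fun e =>
              if ((0 + (if PySem.Str.isIn "AADCED64-746C-4633-A97C-D61349046527" e then 1 else 0)) : Nat) ≠ 0 then
                PySem.Str.join " " (PySem.List.slice (PySem.Str.split₀ e) none (some 1) ++
                  PySem.List.sorted (PySem.List.slice (PySem.Str.split₀ e) (some 1) none ++
                    List.replicate (0 + (if PySem.Str.isIn "AADCED64-746C-4633-A97C-D61349046527" e then 1 else 0))
                    "CAB54552-DEEA-4691-817E-ED4A4D1AFC72") (fun x => x) false)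
              else e)
            = l.map (fun e => if PySem.Str.isIn "AADCED64-746C-4633-A97C-D61349046527" e then
                pvMergeB e "CAB54552-DEEA-4691-817E-ED4A4D1AFC72" else e) from by
          apply List.map_congr_left
          intro e _
          exact pvBodySingle3 e]
        rw [pvSerPass, pvFoldSkip (fun e => e = "")
            (fun e => ((if (List.foldl pvSerStep ("[", false) e.toList).2
                then (List.foldl pvSerStep ("[", false) e.toList).1 ++ "}"
                else (List.foldl pvSerStep ("[", false) e.toList).1) ++ "]")),
          List.nil_append, pvSerSides]
      · -- neither guid present: both only append the two new entries
        have hp3' : PySem.Str.isIn "AADCED64-746C-4633-A97C-D61349046527" en = false := by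
          revert hp3; cases PySem.Str.isIn "AADCED64-746C-4633-A97C-D61349046527" en <;> simp
        simp only [hp1', hp3', Bool.not_false, if_true, Bool.false_and, Bool.false_eq_true, if_false]
        simp only [PySem.List.foldl_append_singleton_eq_map, List.nil_append]
        rw [pvScanEntries' en]
        generalize ((PySem.Str.split? en "[").getD []).map (fun i =>
            PySem.Str.replace (PySem.Str.replace (PySem.Str.replace i "{" "") "}" " ") "]" "") = l
        rw [pvFoldBranch]
        rw [List.nil_append]
        rw [show l.map (fun e => if ((0 + 0 : Nat) ≠ 0) then
                PySem.Str.join " " (PySem.List.slice (PySem.Str.split₀ e) none (some 1) ++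
                  PySem.List.sorted (PySem.List.slice (PySem.Str.split₀ e) (some 1) none ++
                    List.replicate (0 + 0) "CAB54552-DEEA-4691-817E-ED4A4D1AFC72") (fun x => x) false)
              else e) = l from by simp]
        rw [pvSerPass, pvFoldSkip (fun e => e = "")
            (fun e => ((if (List.foldl pvSerStep ("[", false) e.toList).2
                then (List.foldl pvSerStep ("[", false) e.toList).1 ++ "}"
                else (List.foldl pvSerStep ("[", false) e.toList).1) ++ "]")),
          List.nil_append, pvSerSides]
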